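-- pv_equiv track=rewrite | github.com/jorgequintino/MC102-PAD-2024 | lab11/lab11.py | criarterreno
-- ===== SOURCE A (Python) =====
-- def criarterreno(linhas, colunas, coordlinha, coordcoluna, radiacao):
--   terreno = list()
--   for i in range(linhas):
--     terreno.append([])
--     for j in range(colunas):
--       if i==coordlinha and j==coordcoluna:
--         terreno[i].append(radiacao)
--       else:
--         terreno[i].append(0)
--   return terreno
-- ===== SOURCE B (Python) =====
-- def criarterreno(linhas, colunas, coordlinha, coordcoluna, radiacao):
--     if 0 <= coordlinha < linhas and 0 <= coordcoluna < colunas: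
--         hot_row = [0] * coordcoluna + [radiacao] + [0] * (colunas - coordcoluna - 1)
--         return ([[0] * colunas for _ in range(coordlinha)]
--                 + [hot_row]
--                 + [[0] * colunas for _ in range(linhas - coordlinha - 1)])
--     return [[0] * colunas for _ in range(linhas)]
-- ===== Notes on version B (the rewrite author's own statement) =====
-- stated objective: alternative
-- what changed: B never iterates over cells: it assembles the grid by concatenating replicated segments - the zero rows before, a hot row itself built as [0]*cc + [radiacao] + [0]*rest, and the zero rows after - instead of A's nested append loops with a per-cell branch.
import Mathlib
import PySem

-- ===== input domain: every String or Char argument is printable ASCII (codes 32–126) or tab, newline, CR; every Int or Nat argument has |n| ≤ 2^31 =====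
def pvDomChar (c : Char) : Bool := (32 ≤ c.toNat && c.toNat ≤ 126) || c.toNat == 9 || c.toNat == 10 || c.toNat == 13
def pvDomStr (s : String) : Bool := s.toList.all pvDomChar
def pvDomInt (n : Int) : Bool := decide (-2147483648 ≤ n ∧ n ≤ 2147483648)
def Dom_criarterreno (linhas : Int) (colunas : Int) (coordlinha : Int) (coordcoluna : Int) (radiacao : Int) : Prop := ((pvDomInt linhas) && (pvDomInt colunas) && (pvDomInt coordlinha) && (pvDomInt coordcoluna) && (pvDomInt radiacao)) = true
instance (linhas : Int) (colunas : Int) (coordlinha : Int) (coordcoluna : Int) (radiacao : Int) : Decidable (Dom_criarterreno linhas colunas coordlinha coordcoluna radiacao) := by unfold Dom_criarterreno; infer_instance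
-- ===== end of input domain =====

-- ===== PORT A =====
-- Port of A: nested loops appending a fresh row then per-cell branch; terreno[i].append is
-- List.modify at index i (i comes from range(linhas), so i ≥ 0 and i.toNat is exact).
def criarterreno (linhas : Int) (colunas : Int) (coordlinha : Int) (coordcoluna : Int) (radiacao : Int) : List (List Int) :=
  (PySem.List.pyRange 0 linhas 1).foldl
    (fun terreno i =>
      (PySem.List.pyRange 0 colunas 1).foldl
        (fun t j =>
          t.modify i.toNat
            (fun row => row ++ [if i = coordlinha ∧ j = coordcoluna then radiacao else 0]))
        (terreno ++ [[]]))
    []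

-- ===== PORT B =====
-- B: no per-cell work — the grid is assembled by concatenating replicated segments:
-- zero rows before, a hot row (itself [0]*cc ++ [radiacao] ++ [0]*rest), zero rows after.
-- ([0]*n and range(n) are empty for n ≤ 0, exactly List.replicate ∘ Int.toNat.)
def criarterreno_alt (linhas : Int) (colunas : Int) (coordlinha : Int) (coordcoluna : Int) (radiacao : Int) : List (List Int) :=
  if 0 ≤ coordlinha ∧ coordlinha < linhas ∧ 0 ≤ coordcoluna ∧ coordcoluna < colunas then
    let hotRow := List.replicate coordcoluna.toNat 0 ++ [radiacao] ++
                  List.replicate (colunas - coordcoluna - 1).toNat 0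
    List.replicate coordlinha.toNat (List.replicate colunas.toNat 0) ++ [hotRow] ++
      List.replicate (linhas - coordlinha - 1).toNat (List.replicate colunas.toNat 0)
  else
    List.replicate linhas.toNat (List.replicate colunas.toNat 0)

-- ===== PRECONDITION & SPEC =====
def Spec_criarterreno (linhas : Int) (colunas : Int) (coordlinha : Int) (coordcoluna : Int) (radiacao : Int) (out : List (List Int)) : Prop := out = criarterreno_alt linhas colunas coordlinha coordcoluna radiacao
instance (linhas : Int) (colunas : Int) (coordlinha : Int) (coordcoluna : Int) (radiacao : Int) (out : List (List Int)) : Decidable (Spec_criarterreno linhas colunas coordlinha coordcoluna radiacao out) := by unfold Spec_criarterreno; infer_instance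

-- ===== CLAIM (what is proved, stated in full; the proofs are below) =====
def Claim_equal_criarterreno : Prop := ∀ (linhas : Int) (colunas : Int) (coordlinha : Int) (coordcoluna : Int) (radiacao : Int), Dom_criarterreno linhas colunas coordlinha coordcoluna radiacao → Spec_criarterreno linhas colunas coordlinha coordcoluna radiacao (criarterreno linhas colunas coordlinha coordcoluna radiacao)

-- ===== LEMMAS AND PROOFS =====

-- The row A builds for outer index i.
def pvRowA (colunas coordlinha coordcoluna radiacao i : Int) : List Int :=
  (PySem.List.pyRange 0 colunas 1).map
    (fun j => if i = coordlinha ∧ j = coordcoluna then radiacao else 0)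

theorem pv_modify_last (pre : List (List Int)) (row : List Int) (f : List Int → List Int) :
    (pre ++ [row]).modify pre.length f = pre ++ [f row] := by
  apply List.ext_getElem
  · simp
  · intro k h1 h2
    simp only [List.getElem_modify]
    rcases lt_or_eq_of_le (Nat.lt_succ_iff.mp (by simpa using h2)) with hk | hk
    · rw [if_neg (by omega), List.getElem_append_left hk, List.getElem_append_left hk]
    · subst hk
      rw [if_pos rfl, List.getElem_append_right (le_refl _), List.getElem_append_right (le_refl _)]
      simp

-- A's inner loop appends map f js to the last row.
theorem pv_inner_fold (pre : List (List Int)) (row : List Int) (js : List Int) (f : Int → Int) :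
    js.foldl (fun t j => t.modify pre.length (fun r => r ++ [f j])) (pre ++ [row])
      = pre ++ [row ++ js.map f] := by
  induction js generalizing row with
  | nil => simp
  | cons j js ih =>
    simp only [List.foldl_cons, List.map_cons]
    rw [pv_modify_last, ih, List.append_assoc]
    rfl

-- A's outer loop builds the rows pvRowA 0 .. n-1.
theorem pv_A_eq_map (n : Nat) (colunas coordlinha coordcoluna radiacao : Int) :
    criarterreno (n : Int) colunas coordlinha coordcoluna radiacao
      = (PySem.List.pyRange 0 (n : Int) 1).map (pvRowA colunas coordlinha coordcoluna radiacao) := by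
  induction n with
  | zero => simp [criarterreno, PySem.List.pyRange_one_eq_nil]
  | succ n ih =>
    have hcast : ((n + 1 : Nat) : Int) = (n : Int) + 1 := by push_cast; ring
    have hsplit := PySem.List.pyRange_one_succ_right (a := 0) (b := (n : Int)) (by positivity)
    unfold criarterreno at ih ⊢
    rw [hcast, hsplit, List.foldl_append, List.map_append, ih, List.foldl_cons, List.foldl_nil]
    have hlen : ((PySem.List.pyRange 0 (n : Int) 1).map
        (pvRowA colunas coordlinha coordcoluna radiacao)).length = (n : Int).toNat := by
      simp [PySem.List.length_pyRange_one]
    have := pv_inner_fold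
      ((PySem.List.pyRange 0 (n : Int) 1).map (pvRowA colunas coordlinha coordcoluna radiacao))
      [] (PySem.List.pyRange 0 colunas 1)
      (fun j => if (n : Int) = coordlinha ∧ j = coordcoluna then radiacao else 0)
    rw [hlen] at this
    simp only [Int.toNat_natCast] at this ⊢
    rw [this]
    simp [pvRowA]

-- Row shape: the radiation row is B's segment concatenation.
theorem pv_row_hit (colunas coordlinha coordcoluna radiacao : Int)
    (hcc : 0 ≤ coordcoluna) (hlt : coordcoluna < colunas) :
    pvRowA colunas coordlinha coordcoluna radiacao coordlinha
      = List.replicate coordcoluna.toNat 0 ++ [radiacao] ++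
        List.replicate (colunas - coordcoluna - 1).toNat 0 := by
  apply List.ext_getElem
  · simp [pvRowA, PySem.List.length_pyRange_one]; omega
  · intro p h1 h2
    have hp : p < (colunas - 0).toNat := by
      simpa [pvRowA, PySem.List.length_pyRange_one] using h1
    simp only [pvRowA, List.getElem_map, PySem.List.getElem_pyRange_one, zero_add,
      List.getElem_append, List.length_append, List.length_replicate, List.length_cons,
      List.length_nil, List.getElem_replicate]
    split_ifs <;>
      first
        | rfl
        | (exfalso; simp_all; omega)
        | simp_all

-- Row shape: an all-zero row.
theorem pv_row_miss (colunas coordlinha coordcoluna radiacao i : Int)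
    (h : ¬ (i = coordlinha ∧ 0 ≤ coordcoluna ∧ coordcoluna < colunas)) :
    pvRowA colunas coordlinha coordcoluna radiacao i = List.replicate colunas.toNat 0 := by
  apply List.ext_getElem
  · simp [pvRowA, PySem.List.length_pyRange_one]
  · intro p h1 h2
    have hp : p < (colunas - 0).toNat := by
      simpa [pvRowA, PySem.List.length_pyRange_one] using h1
    simp only [pvRowA, List.getElem_map, PySem.List.getElem_pyRange_one, List.getElem_replicate,
      zero_add]
    rw [if_neg]
    rintro ⟨rfl, rfl⟩
    exact h ⟨rfl, by omega, by omega⟩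

-- The mapped rows are B's grid.
theorem pv_map_eq_alt (linhas colunas coordlinha coordcoluna radiacao : Int) :
    (PySem.List.pyRange 0 linhas 1).map (pvRowA colunas coordlinha coordcoluna radiacao)
      = criarterreno_alt linhas colunas coordlinha coordcoluna radiacao := by
  unfold criarterreno_alt
  split
  case isTrue hin =>
    obtain ⟨h1, h2, h3, h4⟩ := hin
    apply List.ext_getElem
    · simp [PySem.List.length_pyRange_one]; omega
    · intro k hk1 hk2
      have hk : k < (linhas - 0).toNat := by
        simpa [PySem.List.length_pyRange_one] using hk1
      simp only [List.getElem_map, PySem.List.getElem_pyRange_one, zero_add,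
        List.getElem_append, List.length_append, List.length_replicate, List.length_cons,
        List.length_nil, List.getElem_replicate]
      split_ifs with ha hb
      · rw [pv_row_miss]; rintro ⟨hik, -⟩; omega
      · have : (k : Int) = coordlinha := by omega
        rw [this]
        have hkc : k - coordlinha.toNat = 0 := by omega
        simp [hkc, pv_row_hit colunas coordlinha coordcoluna radiacao h3 h4]
      · rw [pv_row_miss]; rintro ⟨hik, -⟩; omega
  case isFalse hout =>
    apply List.ext_getElem
    · simp [PySem.List.length_pyRange_one]
    · intro k hk1 hk2
      have hk : k < (linhas - 0).toNat := by
        simpa [PySem.List.length_pyRange_one] using hk1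
      simp only [List.getElem_map, PySem.List.getElem_pyRange_one, List.getElem_replicate, zero_add]
      rw [pv_row_miss]
      rintro ⟨rfl, hc1, hc2⟩
      exact hout ⟨by omega, by omega, hc1, hc2⟩

-- ===== VERDICT (by name: the statement is the Claim_ definition above) =====
theorem criarterreno_spec : Claim_equal_criarterreno := by
  intro linhas colunas coordlinha coordcoluna radiacao _
  unfold Spec_criarterreno
  by_cases hL : linhas ≤ 0
  · have hA : criarterreno linhas colunas coordlinha coordcoluna radiacao = [] := by
      unfold criarterreno
      rw [PySem.List.pyRange_one_eq_nil (a := 0) (b := linhas) (by omega)]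
      rfl
    have hB := pv_map_eq_alt linhas colunas coordlinha coordcoluna radiacao
    rw [PySem.List.pyRange_one_eq_nil (a := 0) (b := linhas) (by omega)] at hB
    simpa [hA] using hB
  · have hn : linhas = ((linhas.toNat : Nat) : Int) := by omega
    rw [hn, pv_A_eq_map, pv_map_eq_alt]
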